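-- pv_equiv track=rewrite | github.com/slow-wave-repo/telegram_json_to_pdf | json-pdf.py | get_time_borders
-- ===== SOURCE A (Python) =====
-- def get_time_borders(input_data):
--     earliest_date = None
--     latest_date = None
--
--     for message in input_data['messages']:
--         current_date = message['date']
--
--         if earliest_date is None or current_date < earliest_date:
--             earliest_date = current_date
--
--         if latest_date is None or current_date > latest_date:
--             latest_date = current_date
--
--     return earliest_date, latest_date
-- ===== SOURCE B (Python) =====
-- def get_time_borders(input_data):
--     messages = input_data['messages']
--     if not messages:
--         return None, None
--     dates = [m['date'] for m in messages]
--     return min(dates), max(dates)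
-- ===== Notes on version B (the rewrite author's own statement) =====
-- stated objective: idiomatic
-- what changed: Replaces the fused loop that maintains both extremes with option-sentinel updates by an empty guard plus a dates list handed to the builtin min and max scans.
import Mathlib
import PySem

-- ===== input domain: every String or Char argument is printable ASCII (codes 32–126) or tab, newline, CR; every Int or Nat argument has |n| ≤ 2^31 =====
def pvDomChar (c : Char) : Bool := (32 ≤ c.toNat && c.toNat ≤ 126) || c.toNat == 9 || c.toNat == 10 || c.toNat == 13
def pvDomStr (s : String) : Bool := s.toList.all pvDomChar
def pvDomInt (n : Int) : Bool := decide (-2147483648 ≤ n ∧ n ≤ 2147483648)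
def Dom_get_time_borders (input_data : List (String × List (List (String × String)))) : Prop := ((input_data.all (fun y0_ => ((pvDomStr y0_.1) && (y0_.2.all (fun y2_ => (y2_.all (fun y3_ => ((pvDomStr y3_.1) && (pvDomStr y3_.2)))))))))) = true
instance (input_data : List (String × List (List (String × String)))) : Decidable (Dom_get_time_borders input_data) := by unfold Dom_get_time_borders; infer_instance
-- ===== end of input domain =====

-- ===== PORT A =====
-- B changes only the decomposition: the fused two-extremes loop becomes a guard plus builtin min/max scans (same O(n) cost).
-- dict[k] lookup on an association list: first match (PySem first-match convention)
def pvLookup (d : List (String × String)) (k : String) : Option String :=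
  (d.find? (fun p => p.1 == k)).map (fun p => p.2)

-- input_data['messages'] (Pre_ guarantees the key is present; outside Pre_ Python raises KeyError)
def pvMsgs (input_data : List (String × List (List (String × String)))) : List (List (String × String)) :=
  ((input_data.find? (fun p => p.1 == "messages")).map (fun p => p.2)).getD []

-- message['date'] (Pre_ guarantees presence)
def pvDate (m : List (String × String)) : String :=
  (pvLookup m "date").getD ""

def get_time_borders (input_data : List (String × List (List (String × String)))) : Option String × Option String :=
  (pvMsgs input_data).foldl
    (fun st m =>
      let current_date := pvDate m
      let earliest := match st.1 with
        | none => some current_date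
        | some e => if current_date < e then some current_date else some e
      let latest := match st.2 with
        | none => some current_date
        | some l => if l < current_date then some current_date else some l
      (earliest, latest))
    (none, none)

-- ===== PORT B =====
def get_time_borders_alt (input_data : List (String × List (List (String × String)))) : Option String × Option String :=
  let messages := pvMsgs input_data
  if messages = [] then (none, none)
  else
    let dates := messages.map pvDate
    (PySem.List.min? dates (fun x => x), PySem.List.max? dates (fun x => x))

-- ===== PRECONDITION & SPEC =====
-- Pre_: the Python raises KeyError unless 'messages' is a key and every message has a 'date' key.
def Pre_get_time_borders (input_data : List (String × List (List (String × String)))) : Prop :=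
  ((input_data.find? (fun p => p.1 == "messages")).elim false
    (fun p => p.2.all (fun m => (m.find? (fun q => q.1 == "date")).isSome))) = true
instance (input_data : List (String × List (List (String × String)))) : Decidable (Pre_get_time_borders input_data) := by unfold Pre_get_time_borders; infer_instance

def pvWitness_get_time_borders : (List (String × List (List (String × String)))) :=
  [("messages", [[("date", "2021-01-02")], [("date", "2021-01-01")]])]

def Spec_get_time_borders (input_data : List (String × List (List (String × String)))) (out : Option String × Option String) : Prop := out = get_time_borders_alt input_data
instance (input_data : List (String × List (List (String × String)))) (out : Option String × Option String) : Decidable (Spec_get_time_borders input_data out) := by unfold Spec_get_time_borders; infer_instance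

-- ===== CLAIM (what is proved, stated in full; the proofs are below) =====
def Claim_equal_get_time_borders : Prop := ∀ (input_data : List (String × List (List (String × String)))), Dom_get_time_borders input_data → Pre_get_time_borders input_data → Spec_get_time_borders input_data (get_time_borders input_data)

-- ===== LEMMAS AND PROOFS =====
theorem pv_min_step (a c : String) : (if c < a then c else a) = min a c := by
  rcases lt_or_ge c a with h|h
  · simp [min_eq_right h.le, h]
  · simp [not_lt.mpr h, min_eq_left h]

theorem pv_max_step (b c : String) : (if b < c then c else b) = max b c := by
  rcases lt_or_ge b c with h|h
  · simp [max_eq_right h.le, h]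
  · simp [not_lt.mpr h, max_eq_left h]

theorem pv_loop (t : List (List (String × String))) :
    ∀ (a b : String),
      t.foldl
        (fun st m =>
          let current_date := pvDate m
          let earliest := match st.1 with
            | none => some current_date
            | some e => if current_date < e then some current_date else some e
          let latest := match st.2 with
            | none => some current_date
            | some l => if l < current_date then some current_date else some l
          (earliest, latest))
        (some a, some b)
      = (some ((t.map pvDate).foldl min a), some ((t.map pvDate).foldl max b)) := by
  induction t with
  | nil => intro a b; rfl
  | cons h t ih =>
      intro a b
      simp only [List.foldl_cons, List.map_cons]
      rw [← apply_ite some (pvDate h < a), ← apply_ite some (b < pvDate h),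
          pv_min_step, pv_max_step]
      exact ih _ _

-- ===== VERDICT (by name: the statement is the Claim_ definition above) =====
theorem get_time_borders_spec : Claim_equal_get_time_borders := by
  intro input_data _ _
  unfold Spec_get_time_borders get_time_borders get_time_borders_alt
  cases hm : pvMsgs input_data with
  | nil => simp
  | cons m t =>
      simp only [List.foldl_cons, List.map_cons, if_neg (List.cons_ne_nil m t)]
      rw [PySem.List.min?_id_cons, PySem.List.max?_id_cons]
      simpa using pv_loop t (pvDate m) (pvDate m)
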